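-- pv_equiv track=rewrite | github.com/smartsearchgraduation/smartsearch-correction | app/masking/tokenizer.py | strip_punct_edges
-- ===== SOURCE A (Python) =====
-- def strip_punct_edges(token: str) -> tuple[str, int, int]:
--     """
--     Return ``(stripped, leading, trailing)`` where ``stripped`` is the
--     token with leading and trailing non-alphanumeric chars removed and
--     ``leading``/``trailing`` are the counts of removed chars on each side.
--
--     Apostrophes in the middle of a token (e.g. "men's") are preserved.
--     """
--     n = len(token)
--     lead = 0
--     while lead < n and not (token[lead].isalnum()):
--         lead += 1
--     trail = 0
--     while trail < n - lead and not (token[n - 1 - trail].isalnum()):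
--         trail += 1
--     return token[lead:n - trail], lead, trail
-- ===== SOURCE B (Python) =====
-- def strip_punct_edges(token: str) -> tuple[str, int, int]:
--     # One pass: track the first and last alphanumeric index.
--     n = len(token)
--     first = -1
--     last = -1
--     for i, ch in enumerate(token):
--         if ch.isalnum():
--             if first == -1:
--                 first = i
--             last = i
--     if first == -1:
--         return "", n, 0
--     return token[first:last + 1], first, n - 1 - last
-- ===== Notes on version B (the rewrite author's own statement) =====
-- stated objective: alternative
-- what changed: Replaced the two directional edge-scan while-loops with a single forward pass that records the first and last alphanumeric indices and derives the strip counts from them.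
import Mathlib
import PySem

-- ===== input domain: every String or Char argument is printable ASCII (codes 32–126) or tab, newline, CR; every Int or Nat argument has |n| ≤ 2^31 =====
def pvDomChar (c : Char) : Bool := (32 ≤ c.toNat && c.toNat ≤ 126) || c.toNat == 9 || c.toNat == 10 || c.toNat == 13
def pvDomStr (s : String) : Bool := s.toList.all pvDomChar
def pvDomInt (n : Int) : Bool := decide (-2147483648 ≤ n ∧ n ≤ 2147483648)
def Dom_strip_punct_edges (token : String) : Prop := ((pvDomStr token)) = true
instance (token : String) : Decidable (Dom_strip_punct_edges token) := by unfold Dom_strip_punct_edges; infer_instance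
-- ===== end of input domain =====

-- B replaces A's two directional edge-scan loops with a single forward pass that
-- records the first and last alphanumeric indices (objective: alternative decomposition).

-- ===== PORT A =====
-- while lead < n and not token[lead].isalnum(): lead += 1
def pvLeadLoop (cs : List Char) : Nat :=
  match cs with
  | [] => 0
  | c :: rest => if PySem.Chars.isalnum c then 0 else pvLeadLoop rest + 1

-- while trail < n - lead and not token[n-1-trail].isalnum(): trail += 1
-- (scan over the reversed list, bounded by the remaining budget n - lead)
def pvTrailLoop (cs : List Char) (fuel : Nat) : Nat :=
  match fuel, cs with
  | 0, _ => 0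
  | _, [] => 0
  | fuel + 1, c :: rest => if PySem.Chars.isalnum c then 0 else pvTrailLoop rest fuel + 1

def strip_punct_edges (token : String) : String × Int × Int :=
  let n := token.toList.length
  let lead := pvLeadLoop token.toList
  let trail := pvTrailLoop token.toList.reverse (n - lead)
  (PySem.Str.slice token (some (lead : Int)) (some ((n : Int) - (trail : Int))),
   (lead : Int), (trail : Int))

-- ===== PORT B =====
-- loop body: if ch.isalnum(): first = i if first == -1 else first; last = i
def pvScanStep (fl : Int × Int) (ic : Int × Char) : Int × Int :=
  if PySem.Chars.isalnum ic.2 then ((if fl.1 == -1 then ic.1 else fl.1), ic.1) else fl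

def strip_punct_edges_alt (token : String) : String × Int × Int :=
  let n := token.toList.length
  let fl := (PySem.List.enumerate token.toList).foldl pvScanStep (-1, -1)
  if fl.1 == -1 then ("", (n : Int), 0)
  else (PySem.Str.slice token (some fl.1) (some (fl.2 + 1)), fl.1, (n : Int) - 1 - fl.2)

-- ===== PRECONDITION & SPEC =====
def Spec_strip_punct_edges (token : String) (out : String × Int × Int) : Prop := out = strip_punct_edges_alt token
instance (token : String) (out : String × Int × Int) : Decidable (Spec_strip_punct_edges token out) := by unfold Spec_strip_punct_edges; infer_instance

-- ===== CLAIM (what is proved, stated in full; the proofs are below) =====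
def Claim_equal_strip_punct_edges : Prop := ∀ (token : String), Dom_strip_punct_edges token → Spec_strip_punct_edges token (strip_punct_edges token)

-- ===== LEMMAS AND PROOFS =====

theorem pvLeadLoop_eq_findIdx (cs : List Char) :
    pvLeadLoop cs = cs.findIdx PySem.Chars.isalnum := by
  induction cs with
  | nil => rfl
  | cons c rest ih =>
    simp only [pvLeadLoop, List.findIdx_cons, ih]
    cases PySem.Chars.isalnum c <;> simp

theorem pvTrailLoop_eq_findIdx (cs : List Char) :
    ∀ fuel, cs.findIdx PySem.Chars.isalnum < fuel →
    pvTrailLoop cs fuel = cs.findIdx PySem.Chars.isalnum := by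
  induction cs with
  | nil => intro fuel h; cases fuel <;> rfl
  | cons c rest ih =>
    intro fuel h
    cases fuel with
    | zero => omega
    | succ f =>
      simp only [pvTrailLoop]
      by_cases hc : PySem.Chars.isalnum c
      · simp [List.findIdx_cons, hc]
      · have hc' : PySem.Chars.isalnum c = false := by simpa using hc
        simp only [List.findIdx_cons, hc', cond_false] at h ⊢
        rw [ih f (by omega)]
        simp

theorem findIdx_le_of_getElem {α : Type} (p : α → Bool) (xs : List α) (i : Nat)
    (h : i < xs.length) (hp : p xs[i] = true) : xs.findIdx p ≤ i := by
  induction xs generalizing i with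
  | nil => simp at h
  | cons x rest ih =>
    cases i with
    | zero => simp at hp; simp [List.findIdx_cons, hp]
    | succ j =>
      simp only [List.findIdx_cons]
      cases hx : p x
      · simpa using Nat.succ_le_succ (ih j (by simpa using h) (by simpa using hp))
      · simp

theorem pvFold_char (cs : List Char) :
    (PySem.List.enumerate cs).foldl pvScanStep (-1, -1) =
      if cs.any PySem.Chars.isalnum then
        (((cs.findIdx PySem.Chars.isalnum : Nat) : Int),
         ((cs.length - 1 - cs.reverse.findIdx PySem.Chars.isalnum : Nat) : Int))
      else (-1, -1) := by
  induction cs using List.reverseRecOn with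
  | nil => simp [PySem.List.enumerate_nil]
  | append_singleton cs c ih =>
    rw [show PySem.List.enumerate (cs ++ [c]) = PySem.List.enumerate (cs ++ [c]) 0 from rfl,
        PySem.List.enumerate_append, List.foldl_append, ih,
        PySem.List.enumerate_cons, PySem.List.enumerate_nil]
    have hrev : (cs ++ [c]).reverse = c :: cs.reverse := by simp
    have hnonef : ¬ cs.any PySem.Chars.isalnum = true →
        cs.findIdx PySem.Chars.isalnum = cs.length := by
      intro ha
      rw [List.findIdx_eq_length]
      intro x hx
      by_contra hpx
      exact ha (List.any_eq_true.mpr ⟨x, hx, by simpa using hpx⟩)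
    by_cases hc : PySem.Chars.isalnum c = true
    · have hany : (cs ++ [c]).any PySem.Chars.isalnum = true := by simp [hc]
      by_cases ha : cs.any PySem.Chars.isalnum = true
      · have hlt : cs.findIdx PySem.Chars.isalnum < cs.length :=
          List.findIdx_lt_length.mpr (by simpa [List.any_eq_true] using ha)
        have h1 : (((cs.findIdx PySem.Chars.isalnum : Nat) : Int) == -1) = false := by
          rw [beq_eq_false_iff_ne]
          omega
        simp only [ha, if_true, List.foldl_cons, List.foldl_nil, pvScanStep,
          if_true, h1, Bool.false_eq_true, if_false, hany, hrev, List.findIdx_cons,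
          hc, cond_true]
        rw [List.findIdx_append, if_pos hlt]
        refine Prod.ext rfl ?_
        have hlen : (cs ++ [c]).length = cs.length + 1 := by simp
        simp only [hlen]
        omega
      · have hfa := hnonef ha
        simp only [ha, Bool.false_eq_true, if_false, hany, if_true, List.foldl_cons,
          List.foldl_nil, pvScanStep, hc, if_true, hrev, List.findIdx_cons, cond_true,
          beq_self_eq_true]
        rw [List.findIdx_append, if_neg (by omega)]
        refine Prod.ext ?_ ?_ <;> simp [List.findIdx_cons, hc]
    · have hc' : PySem.Chars.isalnum c = false := by simpa using hc
      have hany : (cs ++ [c]).any PySem.Chars.isalnum = cs.any PySem.Chars.isalnum := by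
        simp [hc']
      simp only [List.foldl_cons, List.foldl_nil, pvScanStep, hc', Bool.false_eq_true,
        if_false, hany, hrev, List.findIdx_cons, cond_false]
      by_cases ha : cs.any PySem.Chars.isalnum = true
      · have hlt : cs.findIdx PySem.Chars.isalnum < cs.length :=
          List.findIdx_lt_length.mpr (by simpa [List.any_eq_true] using ha)
        have hrlt : cs.reverse.findIdx PySem.Chars.isalnum < cs.length := by
          have h2 : cs.reverse.findIdx PySem.Chars.isalnum < cs.reverse.length :=
            List.findIdx_lt_length.mpr (by simpa [List.any_eq_true] using ha)
          simpa using h2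
        rw [List.findIdx_append, if_pos hlt]
        simp only [ha, if_true]
        refine Prod.ext rfl ?_
        simp only
        congr 1
        simp
        omega
      · simp [ha]

-- ===== VERDICT (by name: the statement is the Claim_ definition above) =====
theorem strip_punct_edges_spec : Claim_equal_strip_punct_edges := by
  intro token _
  unfold Spec_strip_punct_edges strip_punct_edges strip_punct_edges_alt
  simp only [pvFold_char, pvLeadLoop_eq_findIdx]
  by_cases ha : token.toList.any PySem.Chars.isalnum = true
  · set cs := token.toList with hcs
    set n := cs.length with hn
    set f := cs.findIdx PySem.Chars.isalnum with hf
    set r := cs.reverse.findIdx PySem.Chars.isalnum with hr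
    have hflt : f < n := List.findIdx_lt_length.mpr (by simpa [List.any_eq_true] using ha)
    have hpf : PySem.Chars.isalnum cs[f] = true := List.findIdx_getElem (w := hflt)
    -- r ≤ n - 1 - f : the alnum element at index f appears at reverse index n - 1 - f
    have hrle : r ≤ n - 1 - f := by
      have hlt' : n - 1 - f < cs.reverse.length := by simp [hn]; omega
      have hsame : cs.reverse[n - 1 - f] = cs[f] := by
        rw [List.getElem_reverse]
        congr 1
        omega
      exact findIdx_le_of_getElem _ _ _ hlt' (by rw [hsame]; exact hpf)
    have htrail : pvTrailLoop cs.reverse (n - f) = r :=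
      pvTrailLoop_eq_findIdx cs.reverse (n - f) (by omega)
    have hne : ((f : Int) == -1) = false := by rw [beq_eq_false_iff_ne]; omega
    simp only [ha, if_true, hne, Bool.false_eq_true, if_false, htrail]
    refine Prod.ext ?_ (Prod.ext rfl ?_)
    · have hb : ((n : Int) - ((r : Nat) : Int)) = ((n - 1 - r : Nat) : Int) + 1 := by
        omega
      rw [hb]
    · simp only
      omega
  · have hfa : token.toList.findIdx PySem.Chars.isalnum = token.toList.length := by
      rw [List.findIdx_eq_length]
      intro x hx
      by_contra hpx
      exact ha (List.any_eq_true.mpr ⟨x, hx, by simpa using hpx⟩)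
    have h0 : pvTrailLoop token.toList.reverse 0 = 0 := by
      cases token.toList.reverse <;> rfl
    simp only [ha, Bool.false_eq_true, if_false, hfa, Nat.sub_self, h0, beq_self_eq_true,
      if_true]
    refine Prod.ext ?_ (Prod.ext rfl rfl)
    simp only [Nat.cast_zero, sub_zero]
    rw [← String.toList_inj, PySem.Str.toList_slice, PySem.Chars.slice_eq_listSlice]
    have : ((token.toList.length : Nat) : Int) = ((token.toList.length : Nat) : Int) + 0 := by omega
    rw [PySem.List.slice_natCast]
    simp
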